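-- pv_equiv track=rewrite | github.com/gahan9/mystuff | KickStart/2018_Practice_Round/Problem C. Sort a scrambled itinerary.py | route_maker
-- ===== SOURCE A (Python) =====
-- def route_maker(flight_tickets, origin, end, st=""):
--     st += " " + origin
--     dest_of_curr_origin = flight_tickets[origin]
--     if dest_of_curr_origin == end:
--         return st + "-" + end
--     else:
--         st += "-" + dest_of_curr_origin
--         return route_maker(flight_tickets, dest_of_curr_origin, end, st)
-- ===== SOURCE B (Python) =====
-- def route_maker(flight_tickets, origin, end, st=""):
--     nodes = [origin]
--     while flight_tickets[nodes[-1]] != end: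
--         nodes.append(flight_tickets[nodes[-1]])
--     return st + " " + " ".join(n + "-" + flight_tickets[n] for n in nodes)
-- ===== Notes on version B (the rewrite author's own statement) =====
-- stated objective: alternative
-- what changed: B first collects the chain of origins into a list with a while loop, then renders the whole route in one pass as st + ' ' + ' '.join(n + '-' + flight_tickets[n] for n in nodes), replacing A's recursion that threads a growing accumulator string through each call.
import Mathlib
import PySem

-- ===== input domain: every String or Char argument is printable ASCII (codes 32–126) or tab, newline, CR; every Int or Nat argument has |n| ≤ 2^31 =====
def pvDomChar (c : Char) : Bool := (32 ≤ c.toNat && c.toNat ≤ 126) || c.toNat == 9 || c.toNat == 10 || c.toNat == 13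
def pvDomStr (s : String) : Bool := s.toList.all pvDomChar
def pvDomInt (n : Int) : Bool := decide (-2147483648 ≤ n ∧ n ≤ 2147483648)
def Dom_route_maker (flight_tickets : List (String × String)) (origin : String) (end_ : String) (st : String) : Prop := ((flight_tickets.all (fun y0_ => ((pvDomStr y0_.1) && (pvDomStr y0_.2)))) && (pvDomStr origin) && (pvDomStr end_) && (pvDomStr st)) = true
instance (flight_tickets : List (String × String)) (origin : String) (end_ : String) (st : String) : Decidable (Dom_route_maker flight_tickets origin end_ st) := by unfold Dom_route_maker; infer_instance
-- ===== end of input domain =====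

-- B changes the decomposition: it first collects the chain of origins into a list, then renders
-- the route as one join over per-ticket legs, instead of A's recursion threading an accumulator
-- string (objective: alternative; same cost).

-- Strings are handled on the List Char side (PySem.Chars) as the prelude prescribes.
-- dict lookup 'flight_tickets[origin]' (first match in the association list; none = KeyError):
def pvLook (d : List (String × String)) (x : List Char) : Option (List Char) :=
  match d with
  | [] => none
  | (k, v) :: rest => if k.toList = x then some v.toList else pvLook rest x

-- ===== PORT A =====
-- A's unbounded recursion, made total with fuel; Pre_route_maker guarantees the chain reaches
-- end_ within d.length steps, so the fuel is never exhausted on admitted inputs.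
def routeRecA (d : List (String × String)) (origin end_ st : List Char) : Nat → List Char
  | 0 => st
  | f + 1 =>
    let st' := st ++ [' '] ++ origin
    match pvLook d origin with
    | none => st'  -- KeyError in Python; excluded by Pre_route_maker
    | some dest =>
      if dest = end_ then st' ++ ['-'] ++ end_
      else routeRecA d dest end_ (st' ++ ['-'] ++ dest) f

def route_maker (flight_tickets : List (String × String)) (origin : String) (end_ : String) (st : String) : String :=
  String.ofList (routeRecA flight_tickets origin.toList end_.toList st.toList (flight_tickets.length + 1))

-- ===== PORT B =====
-- phase 1 of Source B: the while loop collecting the chain of origins (fuel-bounded as above)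
def chainB (d : List (String × String)) (x end_ : List Char) : Nat → List (List Char)
  | 0 => [x]
  | f + 1 =>
    match pvLook d x with
    | none => [x]  -- KeyError in Python; excluded by Pre_route_maker
    | some dest => if dest = end_ then [x] else x :: chainB d dest end_ f

-- phase 2 of Source B: one leg 'n + "-" + flight_tickets[n]'
def legB (d : List (String × String)) (n : List Char) : List Char :=
  n ++ ['-'] ++ ((pvLook d n).getD [])

def route_maker_alt (flight_tickets : List (String × String)) (origin : String) (end_ : String) (st : String) : String :=
  String.ofList (st.toList ++ [' '] ++
    PySem.Chars.join [' '] ((chainB flight_tickets origin.toList end_.toList (flight_tickets.length + 1)).map (legB flight_tickets)))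

-- ===== PRECONDITION & SPEC =====
-- k-fold iterated ticket lookup starting from x (a property of the input dict, not of either port)
def pvIter (d : List (String × String)) (x : List Char) : Nat → Option (List Char)
  | 0 => some x
  | k + 1 => (pvIter d x k).bind (pvLook d)

-- Pre_ admits exactly the inputs on which the Python A returns: some iterate of the lookup map
-- applied to origin hits end_ (within d.length steps, which is no restriction: a longer chain
-- would revisit a key and cycle forever).  Outside Pre_ A raises KeyError or RecursionError.
def Pre_route_maker (flight_tickets : List (String × String)) (origin : String) (end_ : String) (st : String) : Prop :=
  ∃ k < flight_tickets.length + 1, pvIter flight_tickets origin.toList (k + 1) = some end_.toList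

instance (flight_tickets : List (String × String)) (origin : String) (end_ : String) (st : String) : Decidable (Pre_route_maker flight_tickets origin end_ st) := by unfold Pre_route_maker; infer_instance

def pvWitness_route_maker : (List (String × String)) × String × String × String :=
  ([("JFK", "LAX"), ("LAX", "SFO")], "JFK", "SFO", "")

def Spec_route_maker (flight_tickets : List (String × String)) (origin : String) (end_ : String) (st : String) (out : String) : Prop := out = route_maker_alt flight_tickets origin end_ st
instance (flight_tickets : List (String × String)) (origin : String) (end_ : String) (st : String) (out : String) : Decidable (Spec_route_maker flight_tickets origin end_ st out) := by unfold Spec_route_maker; infer_instance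

-- ===== CLAIM (what is proved, stated in full; the proofs are below) =====
def Claim_equal_route_maker : Prop := ∀ (flight_tickets : List (String × String)) (origin : String) (end_ : String) (st : String), Dom_route_maker flight_tickets origin end_ st → Pre_route_maker flight_tickets origin end_ st → Spec_route_maker flight_tickets origin end_ st (route_maker flight_tickets origin end_ st)

-- ===== LEMMAS AND PROOFS =====

-- peel pvIter from the front instead of the back
theorem pvIter_front (d : List (String × String)) :
    ∀ (n : Nat) (o : List Char), pvIter d o (n + 1) = (pvLook d o).bind (fun y => pvIter d y n) := by
  intro n
  induction n with
  | zero =>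
    intro o
    simp [pvIter]
  | succ n ih =>
    intro o
    show (pvIter d o (n + 1)).bind (pvLook d) = _
    rw [ih o]
    cases h : pvLook d o with
    | none => simp
    | some y => simp [pvIter]

-- the heart: A's recursion equals "st + ' ' + join of the legs of B's chain", for any fuel
-- large enough that some iterate hits end_
theorem routeRecA_eq_chain (d : List (String × String)) (e : List Char) :
    ∀ (fuel : Nat) (o st : List Char),
      (∃ k < fuel, pvIter d o (k + 1) = some e) →
      routeRecA d o e st fuel =
        st ++ [' '] ++ PySem.Chars.join [' '] ((chainB d o e fuel).map (legB d)) := by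
  intro fuel
  induction fuel with
  | zero => intro o st h; obtain ⟨k, hk, _⟩ := h; omega
  | succ f ih =>
    intro o st ⟨k, hk, hiter⟩
    rw [pvIter_front] at hiter
    cases hlook : pvLook d o with
    | none => rw [hlook] at hiter; simp at hiter
    | some dest =>
      rw [hlook] at hiter
      simp only [Option.bind_some] at hiter
      by_cases hde : dest = e
      · simp [routeRecA, chainB, hlook, hde, legB, PySem.Chars.join_singleton, List.append_assoc]
      · -- step case: the chain is o :: (dest :: …), and the IH applies to dest
        have hk' : ∃ k' < f, pvIter d dest (k' + 1) = some e := by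
          cases k with
          | zero => simp [pvIter] at hiter; exact absurd hiter hde
          | succ k' => exact ⟨k', by omega, hiter⟩
        have hchain : ∃ t, chainB d dest e f = dest :: t := by
          cases f with
          | zero => exact ⟨[], rfl⟩
          | succ f' =>
            simp only [chainB]
            cases pvLook d dest with
            | none => exact ⟨[], rfl⟩
            | some y =>
              by_cases hy : y = e
              · exact ⟨[], by simp [hy]⟩
              · exact ⟨chainB d y e f', by simp [hy]⟩
        obtain ⟨t, ht⟩ := hchain
        rw [show routeRecA d o e st (f + 1) = routeRecA d dest e (st ++ [' '] ++ o ++ ['-'] ++ dest) f by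
              simp [routeRecA, hlook, hde, List.append_assoc],
            ih dest (st ++ [' '] ++ o ++ ['-'] ++ dest) hk',
            show chainB d o e (f + 1) = o :: chainB d dest e f by simp [chainB, hlook, hde],
            ht]
        simp [PySem.Chars.join_cons_cons, legB, hlook, List.append_assoc]

-- ===== VERDICT (by name: the statement is the Claim_ definition above) =====
theorem route_maker_spec : Claim_equal_route_maker := by
  intro d origin end_ st _ ⟨k, hk, hiter⟩
  show route_maker d origin end_ st = route_maker_alt d origin end_ st
  unfold route_maker route_maker_alt
  exact congrArg String.ofList (routeRecA_eq_chain d end_.toList (d.length + 1) origin.toList st.toList ⟨k, hk, hiter⟩)
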